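-- pv_equiv track=rewrite | github.com/b-o-r-m-a-l-e-y/dsp-experiments | dspfunc.py | OQPSK_generate
-- ===== SOURCE A (Python) =====
-- def OQPSK_generate(nsymbols, samples_in_symbol, bit_stream):
--     samples_i=[]
--     samples_q=[]
--     nsamples=nsymbols*samples_in_symbol
--     #Generating samples based on bit_stream
--     i_sample=0
--     q_sample=0
--     #Generating offset in Q(t) channel
--     for k in range(int(samples_in_symbol/2)):
--         samples_q.append(q_sample)
--     #Starting bits modulating
--     for k in range(int(len(bit_stream))):
--         if (k%2 == 0): #If odd element, q bit must be changed
--             if bit_stream[k]==0: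
--                 q_sample = -1
--             else:
--                 q_sample = bit_stream[k]
--             for j in range(int(samples_in_symbol)):
--                 #Check for correct equal length
--                 if len(samples_q)<nsamples:
--                     samples_q.append(q_sample)
--         else:
--             if bit_stream[k]==0:
--                 i_sample = -1
--             else:
--                 i_sample = bit_stream[k]
--             for j in range(int(samples_in_symbol)):
--                 samples_i.append(i_sample)
--     return samples_i, samples_q
-- ===== SOURCE B (Python) =====
-- def _val(b):
--     return -1 if b == 0 else b
--
-- def OQPSK_generate(nsymbols, samples_in_symbol, bit_stream):
--     # Index-arithmetic demultiplexing: each output sample is computed directly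
--     # from its sample index t by mapping t back to the bit it belongs to.
--     sps = samples_in_symbol
--     n = len(bit_stream)
--     nodd = n // 2            # bits at odd positions drive I
--     neven = n - nodd         # bits at even positions drive Q
--     samples_i = [_val(bit_stream[2 * (t // sps) + 1]) for t in range(nodd * sps)]
--     off = sps // 2
--     qlen = off + min(neven * sps, max(nsymbols * sps - off, 0))
--     samples_q = [0 if t < off else _val(bit_stream[2 * ((t - off) // sps)])
--                  for t in range(qlen)]
--     return samples_i, samples_q
-- ===== Notes on version B (the rewrite author's own statement) =====
-- stated objective: alternative
-- what changed: A builds both channels by appending inside one stateful loop over bit indices (with a per-append length guard on Q); B first computes each channel's exact length in closed form and then generates every output sample directly from its sample index t, mapping t back to its source bit with a division -- no appending, no replication, no mutable modulator state.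
import Mathlib
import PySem

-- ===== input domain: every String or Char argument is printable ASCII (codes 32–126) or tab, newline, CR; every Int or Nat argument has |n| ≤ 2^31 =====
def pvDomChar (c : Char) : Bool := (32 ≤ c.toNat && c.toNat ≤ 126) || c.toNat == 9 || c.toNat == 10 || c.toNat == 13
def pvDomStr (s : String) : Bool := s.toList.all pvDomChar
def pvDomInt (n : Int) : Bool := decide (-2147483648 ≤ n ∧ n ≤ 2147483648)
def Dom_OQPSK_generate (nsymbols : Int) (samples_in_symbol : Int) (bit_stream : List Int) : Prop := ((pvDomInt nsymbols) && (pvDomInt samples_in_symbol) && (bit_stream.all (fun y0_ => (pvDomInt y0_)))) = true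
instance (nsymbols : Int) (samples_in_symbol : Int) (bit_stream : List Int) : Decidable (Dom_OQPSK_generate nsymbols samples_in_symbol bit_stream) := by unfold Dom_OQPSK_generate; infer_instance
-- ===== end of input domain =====

-- B replaces A's stateful append loops by index-arithmetic demultiplexing: the length of each
-- channel is computed up front and every output sample is obtained directly from its sample
-- index t via a division mapping t back to its bit (objective: alternative decomposition).


-- ===== PORT A =====
-- one iteration of A's 'for k in range(int(len(bit_stream)))' loop body;
-- state = (i_sample, q_sample, samples_i, samples_q), kb = (k, bit_stream[k])
def pvStepA (nsamples sis : Int) (st : Int × Int × List Int × List Int) (kb : Int × Int) :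
    Int × Int × List Int × List Int :=
  let isamp := st.1; let qsamp := st.2.1; let si := st.2.2.1; let sq := st.2.2.2
  let k := kb.1; let b := kb.2
  if PySem.Int.mod k 2 == 0 then
    let q : Int := if b == 0 then -1 else b
    -- for j in range(int(samples_in_symbol)): if len(samples_q) < nsamples: samples_q.append(q_sample)
    let sq := (PySem.List.pyRange 0 sis 1).foldl
      (fun sq _ => if (sq.length : Int) < nsamples then sq ++ [q] else sq) sq
    (isamp, q, si, sq)
  else
    let i : Int := if b == 0 then -1 else b
    -- for j in range(int(samples_in_symbol)): samples_i.append(i_sample)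
    let si := (PySem.List.pyRange 0 sis 1).foldl (fun si _ => si ++ [i]) si
    (i, qsamp, si, sq)

-- int(samples_in_symbol/2): float division then int() truncates toward zero; exact = Int.tdiv for |n| ≤ 2^31
def OQPSK_generate (nsymbols : Int) (samples_in_symbol : Int) (bit_stream : List Int) : List Int × List Int :=
  let nsamples := nsymbols * samples_in_symbol
  -- for k in range(int(samples_in_symbol/2)): samples_q.append(q_sample)   (q_sample is 0 here)
  let samples_q0 : List Int := (PySem.List.pyRange 0 (Int.tdiv samples_in_symbol 2) 1).foldl
    (fun sq _ => sq ++ [(0 : Int)]) []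
  -- for k in range(int(len(bit_stream))): …   (k together with bit_stream[k] via enumerate)
  let st := (PySem.List.enumerate bit_stream 0).foldl (pvStepA nsamples samples_in_symbol)
    ((0 : Int), (0 : Int), ([] : List Int), samples_q0)
  (st.2.2.1, st.2.2.2)

-- ===== PORT B =====
def pvVal (b : Int) : Int := if b == 0 then -1 else b

-- bit_stream[…] indices produced by the two comprehensions are always in range (proved below),
-- so pyGetD with default 0 is an exact port of the Python subscript here.
def OQPSK_generate_alt (nsymbols : Int) (samples_in_symbol : Int) (bit_stream : List Int) : List Int × List Int :=
  let sps := samples_in_symbol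
  let n : Int := bit_stream.length
  let nodd := PySem.Int.floordiv n 2
  let neven := n - nodd
  -- [_val(bit_stream[2*(t//sps)+1]) for t in range(nodd*sps)]
  let samples_i := (PySem.List.pyRange 0 (nodd * sps) 1).map
    (fun t => pvVal (PySem.List.pyGetD bit_stream (2 * PySem.Int.floordiv t sps + 1) 0))
  let off := PySem.Int.floordiv sps 2
  let qlen := off + min (neven * sps) (max (nsymbols * sps - off) 0)
  -- [0 if t < off else _val(bit_stream[2*((t-off)//sps)]) for t in range(qlen)]
  let samples_q := (PySem.List.pyRange 0 qlen 1).map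
    (fun t => if t < off then 0 else pvVal (PySem.List.pyGetD bit_stream (2 * PySem.Int.floordiv (t - off) sps) 0))
  (samples_i, samples_q)

-- ===== PRECONDITION & SPEC =====
def Spec_OQPSK_generate (nsymbols : Int) (samples_in_symbol : Int) (bit_stream : List Int) (out : List Int × List Int) : Prop := out = OQPSK_generate_alt nsymbols samples_in_symbol bit_stream
instance (nsymbols : Int) (samples_in_symbol : Int) (bit_stream : List Int) (out : List Int × List Int) : Decidable (Spec_OQPSK_generate nsymbols samples_in_symbol bit_stream out) := by unfold Spec_OQPSK_generate; infer_instance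

-- ===== CLAIM (what is proved, stated in full; the proofs are below) =====
def Claim_equal_OQPSK_generate : Prop := ∀ (nsymbols : Int) (samples_in_symbol : Int) (bit_stream : List Int), Dom_OQPSK_generate nsymbols samples_in_symbol bit_stream → Spec_OQPSK_generate nsymbols samples_in_symbol bit_stream (OQPSK_generate nsymbols samples_in_symbol bit_stream)

-- ===== LEMMAS AND PROOFS =====

-- proof-only views of the bit stream: the bits at even / odd positions
def pvEvens : List Int → List Int
  | [] => []
  | [b] => [b]
  | b :: _ :: r => b :: pvEvens r

def pvOdds : List Int → List Int
  | [] => []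
  | [_] => []
  | _ :: c :: r => c :: pvOdds r

-- A's unconditional append loop builds a replicate block
theorem pv_foldl_append_const (l : List Int) (s : List Int) (c : Int) :
    l.foldl (fun acc _ => acc ++ [c]) s = s ++ List.replicate l.length c := by
  induction l generalizing s with
  | nil => simp
  | cons x t ih => simp [List.foldl, ih, List.replicate_succ]

-- A's guarded append loop builds a replicate block capped by the remaining room
theorem pv_foldl_guarded (l : List Int) (ns q : Int) (sq : List Int) :
    l.foldl (fun sq _ => if (sq.length : Int) < ns then sq ++ [q] else sq) sq
      = sq ++ List.replicate (min l.length (ns - sq.length).toNat) q := by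
  induction l generalizing sq with
  | nil => simp
  | cons x t ih =>
    simp only [List.foldl]
    by_cases h : (sq.length : Int) < ns
    · rw [if_pos h, ih]
      have h2 : min (x :: t).length (ns - (sq.length : Int)).toNat
          = min t.length (ns - ((sq ++ [q]).length : Int)).toNat + 1 := by
        simp; omega
      rw [h2, List.replicate_succ]
      simp
    · rw [if_neg h, ih]
      have : (ns - (sq.length : Int)).toNat = 0 := by omega
      simp [this]

theorem pv_stepA_even (ns sis k b isamp qsamp : Int) (si sq : List Int)
    (h : PySem.Int.mod k 2 = 0) :
    pvStepA ns sis (isamp, qsamp, si, sq) (k, b)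
      = (isamp, pvVal b, si,
         sq ++ List.replicate (min sis.toNat (ns - (sq.length : Int)).toNat) (pvVal b)) := by
  rw [pvStepA]
  simp only [h, beq_self_eq_true, if_true]
  rw [pv_foldl_guarded]
  simp [pvVal, PySem.List.length_pyRange_one]

theorem pv_stepA_odd (ns sis k b isamp qsamp : Int) (si sq : List Int)
    (h : ¬ PySem.Int.mod k 2 = 0) :
    pvStepA ns sis (isamp, qsamp, si, sq) (k, b)
      = (pvVal b, qsamp, si ++ List.replicate sis.toNat (pvVal b), sq) := by
  rw [pvStepA]
  simp only [beq_iff_eq, h, if_false]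
  rw [pv_foldl_append_const]
  simp [pvVal, PySem.List.length_pyRange_one]

-- invariant of A's main loop, two indices (one even, one odd) at a time
theorem pv_mainA (nsamples sis : Int) (bs : List Int) : ∀ (k : Int), PySem.Int.mod k 2 = 0 →
    ∀ st : Int × Int × List Int × List Int,
    ((PySem.List.enumerate bs k).foldl (pvStepA nsamples sis) st).2.2 =
      (st.2.2.1 ++ (pvOdds bs).flatMap (fun b => List.replicate sis.toNat (pvVal b)),
       st.2.2.2 ++ ((pvEvens bs).flatMap (fun b => List.replicate sis.toNat (pvVal b))).take
         (nsamples - st.2.2.2.length).toNat) := by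
  match bs with
  | [] => intro k hk st; simp [PySem.List.enumerate, pvOdds, pvEvens]
  | [b] =>
    intro k hk st
    obtain ⟨isamp, qsamp, si, sq⟩ := st
    simp only [PySem.List.enumerate_cons, PySem.List.enumerate_nil, List.foldl_cons,
      List.foldl_nil]
    rw [pv_stepA_even _ _ _ _ _ _ _ _ hk]
    simp [pvOdds, pvEvens, List.take_replicate, Nat.min_comm]
  | b :: c :: r =>
    intro k hk st
    obtain ⟨isamp, qsamp, si, sq⟩ := st
    have hk1 : ¬ (PySem.Int.mod (k + 1) 2 = 0) := by
      rw [PySem.Int.mod_eq_emod_of_pos (by omega)] at hk ⊢; omega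
    have hk2 : PySem.Int.mod (k + 2) 2 = 0 := by
      rw [PySem.Int.mod_eq_emod_of_pos (by omega)] at hk ⊢; omega
    have e12 : k + 1 + 1 = k + 2 := by ring
    simp only [PySem.List.enumerate_cons, List.foldl_cons]
    rw [pv_stepA_even _ _ _ _ _ _ _ _ hk, pv_stepA_odd _ _ _ _ _ _ _ _ hk1, e12,
      pv_mainA nsamples sis r (k + 2) hk2]
    simp only [pvOdds, pvEvens, List.flatMap_cons, Prod.mk.injEq]
    constructor
    · simp
    · rw [List.take_append, List.take_replicate, List.append_assoc]
      congr 2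
      · rw [Nat.min_comm]
      · congr 1
        simp only [List.length_append, List.length_replicate]
        omega

-- int(sis/2) (truncation) and sis // 2 (floor) agree after .toNat
theorem pv_tdiv_toNat (sis : Int) : (Int.tdiv sis 2).toNat = (PySem.Int.floordiv sis 2).toNat := by
  rw [PySem.Int.floordiv_eq_ediv_of_pos (by omega)]
  rcases le_or_gt 0 sis with h | h
  · rw [Int.tdiv_eq_ediv_of_nonneg h]
  · have h1 : Int.tdiv sis 2 = -((-sis) / 2) := by
      rw [← Int.tdiv_eq_ediv_of_nonneg (by omega), ← Int.neg_tdiv, neg_neg]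
    have h2 : 0 ≤ (-sis) / 2 := by omega
    omega

theorem pv_flatMap_map {α β γ : Type} (l : List α) (f : α → β) (g : β → List γ) :
    (l.map f).flatMap g = l.flatMap (fun x => g (f x)) := by
  induction l with
  | nil => rfl
  | cons x t ih => simp [ih]

theorem pv_map_range_const {α : Type} (n : Nat) (f : Nat → α) (c : α)
    (h : ∀ k, k < n → f k = c) : (List.range n).map f = List.replicate n c := by
  rw [List.eq_replicate_iff]
  refine ⟨by simp, ?_⟩
  intro x hx
  simp only [List.mem_map, List.mem_range] at hx
  obtain ⟨k, hk, rfl⟩ := hx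
  exact h k hk

-- a map over range (m*k) indexed by t/k is a flatMap of k-blocks
theorem pv_range_div (m k : Nat) (f : Nat → Int) :
    (List.range (m * k)).map (fun t => f (t / k))
      = (List.range m).flatMap (fun i => List.replicate k (f i)) := by
  rcases Nat.eq_zero_or_pos k with hk | hk
  · subst hk; simp
  · induction m with
    | zero => simp
    | succ m ih =>
      rw [Nat.succ_mul, List.range_add, List.map_append, ih, List.range_succ,
        List.flatMap_append, List.flatMap_cons, List.flatMap_nil, List.append_nil,
        List.map_map]
      congr 1
      apply pv_map_range_const
      intro t ht
      simp only [Function.comp]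
      rw [mul_comm m k, Nat.mul_add_div hk, Nat.div_eq_of_lt ht, Nat.add_zero]

-- the odd-position bits, read off by index arithmetic
theorem pv_range_odds (bs : List Int) :
    (List.range (bs.length / 2)).map (fun i => bs.getD (2 * i + 1) 0) = pvOdds bs := by
  match bs with
  | [] => simp [pvOdds]
  | [b] => simp [pvOdds]
  | b :: c :: r =>
    have h2 : (b :: c :: r).length / 2 = r.length / 2 + 1 := by
      simp only [List.length_cons]; omega
    rw [h2, List.range_succ_eq_map, List.map_cons, List.map_map]
    have hc : ((fun i => (b :: c :: r).getD (2 * i + 1) 0) ∘ Nat.succ)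
        = (fun i => r.getD (2 * i + 1) 0) := by
      funext i
      have h3 : 2 * Nat.succ i + 1 = (2 * i + 1) + 1 + 1 := by omega
      simp only [Function.comp, h3, List.getD_cons_succ]
    rw [hc, pv_range_odds r]
    simp [pvOdds]

-- the even-position bits, read off by index arithmetic
theorem pv_range_evens (bs : List Int) :
    (List.range (bs.length - bs.length / 2)).map (fun i => bs.getD (2 * i) 0) = pvEvens bs := by
  match bs with
  | [] => simp [pvEvens]
  | [b] => simp [pvEvens]
  | b :: c :: r =>
    have h2 : (b :: c :: r).length - (b :: c :: r).length / 2
        = (r.length - r.length / 2) + 1 := by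
      simp only [List.length_cons]; omega
    rw [h2, List.range_succ_eq_map, List.map_cons, List.map_map]
    have hc : ((fun i => (b :: c :: r).getD (2 * i) 0) ∘ Nat.succ)
        = (fun i => r.getD (2 * i) 0) := by
      funext i
      have h3 : 2 * Nat.succ i = (2 * i) + 1 + 1 := by omega
      simp only [Function.comp, h3, List.getD_cons_succ]
    rw [hc, pv_range_evens r]
    simp [pvEvens]

-- ===== VERDICT (by name: the statement is the Claim_ definition above) =====
theorem OQPSK_generate_spec : Claim_equal_OQPSK_generate := by
  intro nsyms sps bs _
  unfold Spec_OQPSK_generate OQPSK_generate OQPSK_generate_alt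
  simp only []
  rw [pv_foldl_append_const, pv_mainA (nsyms * sps) sps bs 0 (by decide)]
  simp only [PySem.List.length_pyRange_one, List.nil_append, List.length_replicate,
    Int.sub_zero, pv_tdiv_toNat, Prod.mk.injEq]
  rcases le_or_gt sps 0 with hsps | hsps
  · -- sps ≤ 0: both channels are empty on both sides
    have hfd2 : PySem.Int.floordiv sps 2 = sps / 2 := PySem.Int.floordiv_eq_ediv_of_pos (by omega)
    have hfdL : PySem.Int.floordiv (bs.length : Int) 2 = (bs.length : Int) / 2 :=
      PySem.Int.floordiv_eq_ediv_of_pos (by omega)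
    have hL0 : (0:Int) ≤ (bs.length : Int) := Int.natCast_nonneg _
    have hnodd0 : 0 ≤ PySem.Int.floordiv (bs.length : Int) 2 := by rw [hfdL]; omega
    have hmulI : PySem.Int.floordiv (bs.length : Int) 2 * sps ≤ 0 := by nlinarith
    have hneven0 : 0 ≤ (bs.length : Int) - PySem.Int.floordiv (bs.length : Int) 2 := by
      rw [hfdL]; omega
    have hmulQ : ((bs.length : Int) - PySem.Int.floordiv (bs.length : Int) 2) * sps ≤ 0 := by
      nlinarith
    have hminq : min (((bs.length : Int) - PySem.Int.floordiv (bs.length : Int) 2) * sps)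
        (max (nsyms * sps - PySem.Int.floordiv sps 2) 0) ≤ 0 :=
      le_trans (min_le_left _ _) hmulQ
    have hoff : PySem.Int.floordiv sps 2 ≤ 0 := by rw [hfd2]; omega
    have hstoN : sps.toNat = 0 := by omega
    have hofftoN : (PySem.Int.floordiv sps 2).toNat = 0 := by omega
    refine ⟨?_, ?_⟩
    · rw [PySem.List.pyRange_one_eq_nil hmulI, hstoN]
      simp
    · rw [PySem.List.pyRange_one_eq_nil (add_nonpos hoff hminq), hofftoN, hstoN]
      simp
  · -- sps > 0
    obtain ⟨S, rfl⟩ : ∃ S : Nat, sps = (S : Int) := ⟨sps.toNat, (Int.toNat_of_nonneg hsps.le).symm⟩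
    have hfdS : PySem.Int.floordiv ((S : Nat) : Int) 2 = ((S / 2 : Nat) : Int) := by
      exact_mod_cast PySem.Int.floordiv_natCast S 2
    have hfdL : PySem.Int.floordiv ((bs.length : Nat) : Int) 2 = ((bs.length / 2 : Nat) : Int) := by
      exact_mod_cast PySem.Int.floordiv_natCast bs.length 2
    refine ⟨?_, ?_⟩
    · -- I channel
      rw [hfdL]
      have hcast1 : ((bs.length / 2 : Nat) : Int) * ((S : Nat) : Int)
          = ((bs.length / 2 * S : Nat) : Int) := by push_cast; ring
      rw [hcast1, PySem.List.pyRange_one, List.map_map]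
      simp only [Int.sub_zero, Int.toNat_natCast]
      have hodds : pvOdds bs = (List.range (bs.length / 2)).map (fun i => bs.getD (2 * i + 1) 0) :=
        (pv_range_odds bs).symm
      rw [hodds, pv_flatMap_map]
      have hdiv : (List.range (bs.length / 2)).flatMap
            (fun i => List.replicate S (pvVal (bs.getD (2 * i + 1) 0)))
          = (List.range (bs.length / 2 * S)).map (fun t => pvVal (bs.getD (2 * (t / S) + 1) 0)) :=
        (pv_range_div (bs.length / 2) S (fun i => pvVal (bs.getD (2 * i + 1) 0))).symm
      rw [hdiv]
      refine List.map_congr_left ?_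
      intro k hk
      simp only [Function.comp, zero_add]
      rw [PySem.Int.floordiv_natCast k S]
      have h2 : (2 : Int) * ((k / S : Nat) : Int) + 1 = ((2 * (k / S) + 1 : Nat) : Int) := by
        push_cast; ring
      rw [h2, PySem.List.pyGetD_natCast]
    · -- Q channel
      rw [hfdS, hfdL]
      simp only [Int.toNat_natCast]
      have hE : ((bs.length : Nat) : Int) - ((bs.length / 2 : Nat) : Int)
          = ((bs.length - bs.length / 2 : Nat) : Int) := by
        have : bs.length / 2 ≤ bs.length := Nat.div_le_self _ _
        omega
      have hES : ((bs.length - bs.length / 2 : Nat) : Int) * ((S : Nat) : Int)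
          = (((bs.length - bs.length / 2) * S : Nat) : Int) := by push_cast; ring
      rw [hE, hES]
      have hmin0 : 0 ≤ min ((((bs.length - bs.length / 2) * S : Nat)) : Int)
          (max (nsyms * ((S : Nat) : Int) - ((S / 2 : Nat) : Int)) 0) :=
        le_min (by positivity) (le_max_right _ _)
      have h0O : (0 : Int) ≤ ((S / 2 : Nat) : Int) := by positivity
      rw [PySem.List.pyRange_one_append 0 ((S / 2 : Nat) : Int) _ h0O
        (le_add_of_nonneg_right hmin0), List.map_append]
      congr 1
      · -- the half-symbol offset of zeros
        symm
        rw [PySem.List.pyRange_one, List.map_map]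
        simp only [Int.sub_zero, Int.toNat_natCast]
        apply pv_map_range_const
        intro k hk
        simp only [Function.comp, zero_add]
        have hlt : ((k : Nat) : Int) < ((S / 2 : Nat) : Int) := by exact_mod_cast hk
        rw [if_pos hlt]
      · -- the capped even-bit expansion
        have hevens : pvEvens bs
            = (List.range (bs.length - bs.length / 2)).map (fun i => bs.getD (2 * i) 0) :=
          (pv_range_evens bs).symm
        rw [hevens, pv_flatMap_map]
        have hdiv : (List.range (bs.length - bs.length / 2)).flatMap
              (fun i => List.replicate S (pvVal (bs.getD (2 * i) 0)))
            = (List.range ((bs.length - bs.length / 2) * S)).map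
                (fun t => pvVal (bs.getD (2 * (t / S)) 0)) :=
          (pv_range_div (bs.length - bs.length / 2) S (fun i => pvVal (bs.getD (2 * i) 0))).symm
        rw [hdiv, ← List.map_take, List.take_range]
        rw [PySem.List.pyRange_one, List.map_map]
        have hsub : ((S / 2 : Nat) : Int)
              + min ((((bs.length - bs.length / 2) * S : Nat)) : Int)
                  (max (nsyms * ((S : Nat) : Int) - ((S / 2 : Nat) : Int)) 0)
              - ((S / 2 : Nat) : Int)
            = min ((((bs.length - bs.length / 2) * S : Nat)) : Int)
                (max (nsyms * ((S : Nat) : Int) - ((S / 2 : Nat) : Int)) 0) := by ring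
        rw [hsub]
        have hRN : (min ((((bs.length - bs.length / 2) * S : Nat)) : Int)
              (max (nsyms * ((S : Nat) : Int) - ((S / 2 : Nat) : Int)) 0)).toNat
            = min ((nsyms * ((S : Nat) : Int) - ((S / 2 : Nat) : Int)).toNat)
                ((bs.length - bs.length / 2) * S) := by omega
        rw [hRN]
        refine List.map_congr_left ?_
        intro k hk
        simp only [Function.comp]
        have hnlt : ¬ (((S / 2 : Nat) : Int) + ((k : Nat) : Int) < ((S / 2 : Nat) : Int)) := by
          omega
        rw [if_neg hnlt]
        have hsub2 : ((S / 2 : Nat) : Int) + ((k : Nat) : Int) - ((S / 2 : Nat) : Int)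
            = ((k : Nat) : Int) := by ring
        rw [hsub2, PySem.Int.floordiv_natCast k S]
        have h2 : (2 : Int) * ((k / S : Nat) : Int) = ((2 * (k / S) : Nat) : Int) := by
          push_cast; ring
        rw [h2, PySem.List.pyGetD_natCast]
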